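-- pv_equiv track=rewrite | github.com/luffah/Terminus | tools/lib/python3/_terminal_game_common/po.py | _get_first_po_content_line
-- ===== SOURCE A (Python) =====
-- def _get_first_po_content_line(lines):
--     start = 0
--     commentback = 0
--     for line in lines:
--         poline = " ".join(line.split())
--         if poline == 'msgid ""':
--             commentback = 0
--         elif poline.startswith('msgid "'):
--             break
--         elif poline.startswith('#'):
--             commentback += 1
--         start += 1
--
--     return start - commentback
-- ===== SOURCE B (Python) =====
-- def _get_first_po_content_line(lines):
--     norm = [" ".join(l.split()) for l in lines]
--     prefix = []
--     for p in norm: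
--         if p.startswith('msgid "') and p != 'msgid ""':
--             break
--         prefix.append(p)
--     count = 0
--     for p in reversed(prefix):
--         if p == 'msgid ""':
--             break
--         if p.startswith('#'):
--             count += 1
--     return len(prefix) - count
-- ===== Notes on version B (the rewrite author's own statement) =====
-- stated objective: alternative
-- what changed: A's single forward scan with a commentback counter that is reset at every normalized 'msgid ""' line is replaced by two simple passes: take the prefix of normalized lines before the first real msgid line, then count '#' lines scanning that prefix backwards until the last 'msgid ""'.
import Mathlib
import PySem

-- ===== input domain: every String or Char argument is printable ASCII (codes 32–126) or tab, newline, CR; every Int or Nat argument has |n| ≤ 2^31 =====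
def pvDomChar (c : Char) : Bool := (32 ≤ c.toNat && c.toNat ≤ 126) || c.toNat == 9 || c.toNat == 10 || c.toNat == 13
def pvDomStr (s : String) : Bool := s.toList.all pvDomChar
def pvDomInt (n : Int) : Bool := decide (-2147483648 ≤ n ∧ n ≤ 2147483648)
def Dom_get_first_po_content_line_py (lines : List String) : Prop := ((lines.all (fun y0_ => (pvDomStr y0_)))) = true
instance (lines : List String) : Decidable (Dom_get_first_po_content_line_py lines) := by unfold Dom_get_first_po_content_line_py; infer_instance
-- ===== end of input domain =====

-- B replaces A's single forward scan (with a commentback counter reset at each 'msgid ""')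
-- by two passes: take the prefix before the first real msgid line, then count '#' lines
-- scanning that prefix BACKWARDS until the last 'msgid ""'. Objective: alternative decomposition.

-- the two literal strings of the Python, as char lists: 'msgid ""' and 'msgid "'
def pvHdr : List Char := ['m', 's', 'g', 'i', 'd', ' ', '"', '"']
def pvMsgidQ : List Char := ['m', 's', 'g', 'i', 'd', ' ', '"']

-- shared with B: poline = " ".join(line.split())  (kept as a char list; l.data = l.toList)
def pvNorm (l : String) : List Char := PySem.Chars.join [' '] (PySem.Chars.split₀ l.data)

-- ===== PORT A =====
def pvLoopA : List String → Int → Int → Int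
  | [], start, cb => start - cb
  | l :: ls, start, cb =>
    let poline := pvNorm l
    if poline = pvHdr then pvLoopA ls (start + 1) 0
    else if PySem.Chars.startswith poline pvMsgidQ then start - cb
    else if PySem.Chars.startswith poline ['#'] then pvLoopA ls (start + 1) (cb + 1)
    else pvLoopA ls (start + 1) cb

def get_first_po_content_line_py (lines : List String) : Int := pvLoopA lines 0 0

-- ===== PORT B =====
def pvBStop (p : List Char) : Bool := PySem.Chars.startswith p pvMsgidQ && !(p == pvHdr)

-- first loop of Source B: prefix of norm before the first real msgid line
def pvPrefix : List (List Char) → List (List Char)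
  | [] => []
  | p :: ps => if pvBStop p then [] else p :: pvPrefix ps

-- second loop of Source B, run over reversed(prefix): count '#' lines until 'msgid ""'
def pvCount : List (List Char) → Int
  | [] => 0
  | p :: ps =>
    if p = pvHdr then 0
    else (if PySem.Chars.startswith p ['#'] then 1 else 0) + pvCount ps

def get_first_po_content_line_py_alt (lines : List String) : Int :=
  let norm := lines.map pvNorm
  let pre := pvPrefix norm
  (pre.length : Int) - pvCount pre.reverse

-- ===== PRECONDITION & SPEC =====
def Spec_get_first_po_content_line_py (lines : List String) (out : Int) : Prop := out = get_first_po_content_line_py_alt lines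
instance (lines : List String) (out : Int) : Decidable (Spec_get_first_po_content_line_py lines out) := by unfold Spec_get_first_po_content_line_py; infer_instance

-- ===== CLAIM (what is proved, stated in full; the proofs are below) =====
def Claim_equal_get_first_po_content_line_py : Prop := ∀ (lines : List String), Dom_get_first_po_content_line_py lines → Spec_get_first_po_content_line_py lines (get_first_po_content_line_py lines)

-- ===== LEMMAS AND PROOFS =====

-- appending one element to the scanned list adds its contribution iff no 'msgid ""' occurs before it
theorem pvCount_append (qs : List (List Char)) (x : List Char) :
    pvCount (qs ++ [x]) = pvCount qs +
      (if pvHdr ∈ qs then 0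
       else if x = pvHdr then 0
       else if PySem.Chars.startswith x ['#'] then (1 : Int) else 0) := by
  induction qs with
  | nil => simp [pvCount]
  | cons q qs ih =>
    by_cases hq : q = pvHdr
    · simp [pvCount, hq]
    · have hne : pvHdr ≠ q := fun h => hq h.symm
      by_cases hm : pvHdr ∈ qs <;>
        simp [pvCount, hq, ih, List.mem_cons, hne, hm] <;> split_ifs <;> ring

-- loop invariant relating A's single forward pass to B's prefix/backward-count decomposition
theorem pvLoopA_eq (ls : List String) : ∀ (start cb : Int),
    pvLoopA ls start cb =
      start + ((pvPrefix (ls.map pvNorm)).length : Int) -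
        ((if pvHdr ∈ pvPrefix (ls.map pvNorm) then 0 else cb) +
          pvCount (pvPrefix (ls.map pvNorm)).reverse) := by
  induction ls with
  | nil => intro start cb; simp [pvLoopA, pvPrefix, pvCount]
  | cons l ls ih =>
    intro start cb
    by_cases h1 : pvNorm l = pvHdr
    · have hstop : pvBStop (pvNorm l) = false := by simp [pvBStop, h1]
      have hrw : pvPrefix ((l :: ls).map pvNorm) = pvNorm l :: pvPrefix (ls.map pvNorm) := by
        simp [pvPrefix, hstop]
      have hA : pvLoopA (l :: ls) start cb = pvLoopA ls (start + 1) 0 := by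
        simp [pvLoopA, h1]
      rw [hA, ih, hrw]
      by_cases h4 : pvHdr ∈ pvPrefix (ls.map pvNorm) <;>
        simp [List.reverse_cons, pvCount_append, List.mem_reverse, h4, h1, List.mem_cons] <;>
        push_cast <;> ring
    · have hne : pvHdr ≠ pvNorm l := fun h => h1 h.symm
      by_cases h2 : PySem.Chars.startswith (pvNorm l) pvMsgidQ = true
      · have hstop : pvBStop (pvNorm l) = true := by simp [pvBStop, h1, h2]
        have hpre : pvPrefix ((l :: ls).map pvNorm) = [] := by simp [pvPrefix, hstop]
        have hA : pvLoopA (l :: ls) start cb = start - cb := by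
          simp [pvLoopA, h1, h2]
        rw [hA, hpre]
        simp [pvCount]
      · have hstop : pvBStop (pvNorm l) = false := by simp [pvBStop, h2]
        have hrw : pvPrefix ((l :: ls).map pvNorm) = pvNorm l :: pvPrefix (ls.map pvNorm) := by
          simp [pvPrefix, hstop]
        by_cases h3 : PySem.Chars.startswith (pvNorm l) ['#'] = true
        · have hA : pvLoopA (l :: ls) start cb = pvLoopA ls (start + 1) (cb + 1) := by
            simp [pvLoopA, h1, h2, h3]
          rw [hA, ih, hrw]
          by_cases h4 : pvHdr ∈ pvPrefix (ls.map pvNorm) <;>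
            simp [List.reverse_cons, pvCount_append, List.mem_reverse, h4, h1, hne, h3,
              List.mem_cons] <;> push_cast <;> ring
        · have hA : pvLoopA (l :: ls) start cb = pvLoopA ls (start + 1) cb := by
            simp [pvLoopA, h1, h2, h3]
          rw [hA, ih, hrw]
          by_cases h4 : pvHdr ∈ pvPrefix (ls.map pvNorm) <;>
            simp [List.reverse_cons, pvCount_append, List.mem_reverse, h4, h1, hne, h3,
              List.mem_cons] <;> push_cast <;> ring

-- ===== VERDICT (by name: the statement is the Claim_ definition above) =====
theorem get_first_po_content_line_py_spec : Claim_equal_get_first_po_content_line_py := by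
  intro lines _
  unfold Spec_get_first_po_content_line_py get_first_po_content_line_py get_first_po_content_line_py_alt
  rw [pvLoopA_eq]
  by_cases h : pvHdr ∈ pvPrefix (lines.map pvNorm) <;> simp [h] <;> ring
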